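-- pv_equiv track=rewrite | github.com/TheDaniel166/IsopGem | scripts/apply_asterism_style.py | render_asterism
-- ===== SOURCE A (Python) =====
-- def render_asterism(grid):
--     if not grid:
--         return ""
--
--     height = len(grid)
--     width = len(grid[0])
--
--     output_lines = []
--
--     for y in range(height):
--         # 1. Star Row
--         row_str = ""
--         for x in range(width):
--             # Render Node
--             if grid[y][x]:
--                 row_str += "★"
--             else:
--                 row_str += "·"
--
--             # Render Horizontal Link (East)
--             if x < width - 1:
--                 # If both current and next are stars, connect them
--                 if grid[y][x] and grid[y][x+1]:
--                     row_str += "──"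
--                 else:
--                     row_str += "  "
--         output_lines.append(row_str)
--
--         # 2. Vertical Link Row (South) - only if not the last row
--         if y < height - 1:
--             link_row_str = ""
--             for x in range(width):
--                 # Check South connection
--                 # Logic: If both current(x,y) and below(x,y+1) are stars, connect
--                 if grid[y][x] and grid[y+1][x]:
--                     link_row_str += "│"
--                 else:
--                     link_row_str += " "
--
--                 # Spacer matching the horizontal link length (2 chars)
--                 if x < width - 1:
--                     link_row_str += "  "
--
--             # Optimization: Don't add blank link rows if they are empty?
--             # No, we need them to maintain the aspect ratio/visual logic,
--             # otherwise disjointed stars look weird.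
--             output_lines.append(link_row_str)
--
--     return "\n".join(output_lines)
-- ===== SOURCE B (Python) =====
-- def render_asterism(grid):
--     if not grid:
--         return ""
--     height = len(grid)
--     width = len(grid[0])
--
--     def ch(r, c):
--         # compute the character at canvas coordinate (r, c) directly
--         y, dy = divmod(r, 2)
--         x, dx = divmod(c, 3)
--         if dy == 0:
--             if dx == 0:
--                 return "★" if grid[y][x] else "·"
--             return "─" if grid[y][x] and grid[y][x + 1] else " "
--         if dx == 0:
--             return "│" if grid[y][x] and grid[y + 1][x] else " "
--         return " "
--
--     return "\n".join(
--         "".join(ch(r, c) for c in range(max(0, 3 * width - 2)))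
--         for r in range(2 * height - 1)
--     )
-- ===== Notes on version B (the rewrite author's own statement) =====
-- stated objective: alternative
-- what changed: B computes each output character directly from its canvas coordinate (r, c) by divmod arithmetic over a 2h-1 by max(0,3w-2) coordinate space, instead of A's incremental row-by-row string building with nested loops, lookahead appends and interleaved link rows.
import Mathlib
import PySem

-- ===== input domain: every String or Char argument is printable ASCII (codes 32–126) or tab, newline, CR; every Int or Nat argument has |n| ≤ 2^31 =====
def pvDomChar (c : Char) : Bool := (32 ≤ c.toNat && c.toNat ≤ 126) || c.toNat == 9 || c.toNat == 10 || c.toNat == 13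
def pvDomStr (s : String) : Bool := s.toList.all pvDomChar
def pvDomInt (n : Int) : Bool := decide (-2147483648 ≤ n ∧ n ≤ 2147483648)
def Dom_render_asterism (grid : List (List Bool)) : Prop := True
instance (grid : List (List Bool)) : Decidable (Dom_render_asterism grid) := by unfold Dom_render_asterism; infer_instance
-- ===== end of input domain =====

-- B replaces A's incremental row-by-row string building (nested loops with lookahead
-- appends) by a coordinate formula: each character of the 2h-1 × max(0,3w-2) canvas is
-- computed directly from its (row, column) position by divmod arithmetic. Same cost,
-- alternative decomposition.

-- ===== PORT A =====
-- strings are built as List Char (PySem.Chars); the final "\n".join wraps to String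
def render_asterism (grid : List (List Bool)) : String :=
  if grid = [] then "" else
    let height : Int := grid.length
    let width : Int := (PySem.List.pyGetD grid 0 []).length
    let output_lines : List (List Char) :=
      (PySem.List.pyRange 0 height 1).foldl (fun acc y =>
        let row_str : List Char :=
          (PySem.List.pyRange 0 width 1).foldl (fun s x =>
            let s := s ++ (if PySem.List.pyGetD (PySem.List.pyGetD grid y []) x false
                           then ['★'] else ['·'])
            if x < width - 1 then
              s ++ (if PySem.List.pyGetD (PySem.List.pyGetD grid y []) x false
                      && PySem.List.pyGetD (PySem.List.pyGetD grid y []) (x + 1) false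
                    then ['─', '─'] else [' ', ' '])
            else s) []
        let acc := acc ++ [row_str]
        if y < height - 1 then
          let link_row_str : List Char :=
            (PySem.List.pyRange 0 width 1).foldl (fun s x =>
              let s := s ++ (if PySem.List.pyGetD (PySem.List.pyGetD grid y []) x false
                               && PySem.List.pyGetD (PySem.List.pyGetD grid (y + 1) []) x false
                             then ['│'] else [' '])
              if x < width - 1 then s ++ [' ', ' '] else s) []
          acc ++ [link_row_str]
        else acc) []
    String.ofList (PySem.Chars.join ['\n'] output_lines)

-- ===== PORT B =====
-- grid[y][x]: all indices Source B evaluates are in range under Pre_; getD is exact there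
def pvCell (grid : List (List Bool)) (y x : Nat) : Bool := (grid.getD y []).getD x false

-- the inner function ch(r, c): the canvas character at coordinate (r, c), by divmod
def pvCh (grid : List (List Bool)) (r c : Nat) : Char :=
  let y := r / 2
  let dy := r % 2
  let x := c / 3
  let dx := c % 3
  if dy = 0 then
    if dx = 0 then (if pvCell grid y x then '★' else '·')
    else (if pvCell grid y x && pvCell grid y (x + 1) then '─' else ' ')
  else
    if dx = 0 then (if pvCell grid y x && pvCell grid (y + 1) x then '│' else ' ')
    else ' '

-- range(max(0, 3*width-2)) / range(2*height-1): Nat subtraction clamps at 0 exactly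
-- like the max(0, ·); List.range is python range over these nonnegative bounds
def render_asterism_alt (grid : List (List Bool)) : String :=
  if grid = [] then "" else
    let height := grid.length
    let width := (grid.headD []).length
    String.ofList (PySem.Chars.join ['\n']
      ((List.range (2 * height - 1)).map (fun r =>
        (List.range (3 * width - 2)).map (fun c => pvCh grid r c))))

-- ===== PRECONDITION & SPEC =====
-- Pre_ excludes ragged grids in which some row is shorter than the first row:
-- there the Python A raises IndexError (grid[y][x] out of range), and so does B.
def Pre_render_asterism (grid : List (List Bool)) : Prop :=
  ∀ row ∈ grid, (grid.headD []).length ≤ row.length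
instance (grid : List (List Bool)) : Decidable (Pre_render_asterism grid) := by
  unfold Pre_render_asterism; infer_instance
def pvWitness_render_asterism : List (List Bool) := [[true, false], [true, true]]

def Spec_render_asterism (grid : List (List Bool)) (out : String) : Prop := out = render_asterism_alt grid
instance (grid : List (List Bool)) (out : String) : Decidable (Spec_render_asterism grid out) := by unfold Spec_render_asterism; infer_instance

-- ===== CLAIM (what is proved, stated in full; the proofs are below) =====
def Claim_equal_render_asterism : Prop := ∀ (grid : List (List Bool)), Dom_render_asterism grid → Pre_render_asterism grid → Spec_render_asterism grid (render_asterism grid)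

-- ===== LEMMAS AND PROOFS =====

-- canonical line shapes both ports are reduced to
def pvNodeL (row : List Bool) (w : Nat) : List Char :=
  (List.range w).flatMap (fun x =>
    (if row.getD x false then ['★'] else ['·']) ++
      if x + 1 < w then
        (if row.getD x false && row.getD (x + 1) false then ['─', '─'] else [' ', ' '])
      else [])

def pvLinkL (p c : List Bool) (w : Nat) : List Char :=
  (List.range w).flatMap (fun x =>
    (if p.getD x false && c.getD x false then ['│'] else [' ']) ++
      if x + 1 < w then [' ', ' '] else [])

def pvLines (w : Nat) : List (List Bool) → List (List Char)
  | [] => []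
  | [a] => [pvNodeL a w]
  | a :: b :: t => pvNodeL a w :: pvLinkL a b w :: pvLines w (b :: t)

-- ---------- A side ----------

theorem pv_starRow (row : List Bool) (w : Nat) :
    (PySem.List.pyRange 0 (w : Int) 1).foldl (fun s x =>
        let s := s ++ (if PySem.List.pyGetD row x false then ['★'] else ['·'])
        if x < (w : Int) - 1 then
          s ++ (if PySem.List.pyGetD row x false && PySem.List.pyGetD row (x + 1) false
                then ['─', '─'] else [' ', ' '])
        else s) [] = pvNodeL row w := by
  rw [show (fun (s : List Char) (x : Int) =>
        let s := s ++ (if PySem.List.pyGetD row x false then ['★'] else ['·'])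
        if x < (w : Int) - 1 then
          s ++ (if PySem.List.pyGetD row x false && PySem.List.pyGetD row (x + 1) false
                then ['─', '─'] else [' ', ' '])
        else s) = (fun s x => s ++
          ((if PySem.List.pyGetD row x false then ['★'] else ['·']) ++
            if x < (w : Int) - 1 then
              (if PySem.List.pyGetD row x false && PySem.List.pyGetD row (x + 1) false
               then ['─', '─'] else [' ', ' '])
            else [])) from by
    funext s x
    by_cases hx : x < (w : Int) - 1 <;> simp [hx]]
  rw [PySem.List.foldl_append_eq_flatMap, List.nil_append,
    PySem.List.pyRange_one, List.flatMap_map]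
  rw [show (w : Int) - 0 = (w : Int) from by ring, Int.toNat_natCast]
  unfold pvNodeL
  apply List.flatMap_congr
  intro x hx
  have hxw : x < w := List.mem_range.mp hx
  have h1 : PySem.List.pyGetD row ((0 : Int) + (x : Int)) false = row.getD x false := by
    simp [PySem.List.pyGetD_natCast]
  have h2 : PySem.List.pyGetD row ((0 : Int) + (x : Int) + 1) false = row.getD (x + 1) false := by
    rw [show (0 : Int) + (x : Int) + 1 = ((x + 1 : Nat) : Int) from by push_cast; ring,
      PySem.List.pyGetD_natCast]
  congr 1
  · rw [h1]
  · by_cases hc : x + 1 < w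
    · rw [if_pos (show (0 : Int) + (x : Int) < (w : Int) - 1 from by omega),
        if_pos hc, h1, h2]
    · rw [if_neg (show ¬ ((0 : Int) + (x : Int) < (w : Int) - 1) from by omega),
        if_neg hc]

theorem pv_linkRow (p c : List Bool) (w : Nat) :
    (PySem.List.pyRange 0 (w : Int) 1).foldl (fun s x =>
        let s := s ++ (if PySem.List.pyGetD p x false && PySem.List.pyGetD c x false
                       then ['│'] else [' '])
        if x < (w : Int) - 1 then s ++ [' ', ' '] else s) [] = pvLinkL p c w := by
  rw [show (fun (s : List Char) (x : Int) =>
        let s := s ++ (if PySem.List.pyGetD p x false && PySem.List.pyGetD c x false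
                       then ['│'] else [' '])
        if x < (w : Int) - 1 then s ++ [' ', ' '] else s) = (fun s x => s ++
          ((if PySem.List.pyGetD p x false && PySem.List.pyGetD c x false then ['│'] else [' ']) ++
            if x < (w : Int) - 1 then [' ', ' '] else [])) from by
    funext s x
    by_cases hx : x < (w : Int) - 1 <;> simp [hx]]
  rw [PySem.List.foldl_append_eq_flatMap, List.nil_append,
    PySem.List.pyRange_one, List.flatMap_map]
  rw [show (w : Int) - 0 = (w : Int) from by ring, Int.toNat_natCast]
  unfold pvLinkL
  apply List.flatMap_congr
  intro x hx
  have hxw : x < w := List.mem_range.mp hx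
  have h1 : PySem.List.pyGetD p ((0 : Int) + (x : Int)) false = p.getD x false := by
    simp [PySem.List.pyGetD_natCast]
  have h2 : PySem.List.pyGetD c ((0 : Int) + (x : Int)) false = c.getD x false := by
    simp [PySem.List.pyGetD_natCast]
  congr 1
  · rw [h1, h2]
  · by_cases hc : x + 1 < w
    · rw [if_pos (show (0 : Int) + (x : Int) < (w : Int) - 1 from by omega), if_pos hc]
    · rw [if_neg (show ¬ ((0 : Int) + (x : Int) < (w : Int) - 1) from by omega),
        if_neg hc]

-- A's interleaved line list, in indexed form, equals pvLines
theorem pv_Alines (w : Nat) :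
    ∀ (rest : List (List Bool)) (g0 : List Bool),
      (List.range (rest.length + 1)).flatMap (fun y =>
          [pvNodeL ((g0 :: rest).getD y []) w] ++
            if y + 1 < rest.length + 1 then
              [pvLinkL ((g0 :: rest).getD y []) ((g0 :: rest).getD (y + 1) []) w]
            else []) = pvLines w (g0 :: rest) := by
  intro rest
  induction rest with
  | nil => intro g0; simp [pvLines]
  | cons b t ih =>
    intro g0
    rw [List.range_succ_eq_map, List.flatMap_cons, List.flatMap_map]
    simp only [Nat.succ_eq_add_one, List.getD_cons_succ, List.getD_cons_zero,
      List.length_cons, Nat.add_lt_add_iff_right]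
    rw [if_pos (by omega)]
    have ihb := ih b
    simp only [List.getD_cons_succ, Nat.add_lt_add_iff_right] at ihb
    rw [ihb]
    simp [pvLines]

-- ---------- B side ----------

-- every index of range(3n+1) written as 3x, 3x+1, 3x+2 per cell, plus the last glyph
theorem pv_three (f : Nat → Char) :
    ∀ (n : Nat), (List.range (3 * n + 1)).map f =
      (List.range n).flatMap (fun x => [f (3 * x), f (3 * x + 1), f (3 * x + 2)]) ++ [f (3 * n)] := by
  intro n
  induction n with
  | zero => simp
  | succ k ih =>
    have e1 : 3 * (k + 1) + 1 = ((3 * k + 1) + 1 + 1) + 1 := by ring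
    rw [e1, List.range_succ, List.range_succ, List.range_succ, List.map_append, List.map_append,
      List.map_append, ih, List.range_succ, List.flatMap_append, List.flatMap_cons,
      List.flatMap_nil]
    have e2 : 3 * k + 1 + 1 = 3 * k + 2 := by ring
    have e3 : 3 * k + 1 + 1 + 1 = 3 * (k + 1) := by ring
    rw [e2, e3]
    simp [List.append_assoc]

theorem pv_ch_even0 (grid : List (List Bool)) (x : Nat) :
    pvCh grid 0 (3 * x) = (if pvCell grid 0 x then '★' else '·') := by
  unfold pvCh
  have h1 : 3 * x / 3 = x := by omega
  have h2 : 3 * x % 3 = 0 := by omega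
  simp [h1, h2]

theorem pv_ch_even1 (grid : List (List Bool)) (x : Nat) :
    pvCh grid 0 (3 * x + 1) = (if pvCell grid 0 x && pvCell grid 0 (x + 1) then '─' else ' ') := by
  unfold pvCh
  have h1 : (3 * x + 1) / 3 = x := by omega
  have h2 : (3 * x + 1) % 3 = 1 := by omega
  simp [h1, h2]

theorem pv_ch_even2 (grid : List (List Bool)) (x : Nat) :
    pvCh grid 0 (3 * x + 2) = (if pvCell grid 0 x && pvCell grid 0 (x + 1) then '─' else ' ') := by
  unfold pvCh
  have h1 : (3 * x + 2) / 3 = x := by omega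
  have h2 : (3 * x + 2) % 3 = 2 := by omega
  simp [h1, h2]

theorem pv_ch_odd0 (grid : List (List Bool)) (x : Nat) :
    pvCh grid 1 (3 * x) = (if pvCell grid 0 x && pvCell grid 1 x then '│' else ' ') := by
  unfold pvCh
  have h1 : 3 * x / 3 = x := by omega
  have h2 : 3 * x % 3 = 0 := by omega
  simp [h1, h2]

theorem pv_ch_odd1 (grid : List (List Bool)) (x : Nat) :
    pvCh grid 1 (3 * x + 1) = ' ' := by
  unfold pvCh
  have h2 : (3 * x + 1) % 3 = 1 := by omega
  simp [h2]

theorem pv_ch_odd2 (grid : List (List Bool)) (x : Nat) :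
    pvCh grid 1 (3 * x + 2) = ' ' := by
  unfold pvCh
  have h2 : (3 * x + 2) % 3 = 2 := by omega
  simp [h2]

theorem pv_cell0 (grid : List (List Bool)) (x : Nat) :
    pvCell grid 0 x = (grid.headD []).getD x false := by
  cases grid <;> simp [pvCell]

theorem pv_bRow0 (grid : List (List Bool)) (w : Nat) :
    (List.range (3 * w - 2)).map (pvCh grid 0) = pvNodeL (grid.headD []) w := by
  cases w with
  | zero => simp [pvNodeL]
  | succ k =>
    rw [show 3 * (k + 1) - 2 = 3 * k + 1 from by omega, pv_three (pvCh grid 0) k]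
    unfold pvNodeL
    rw [List.range_succ, List.flatMap_append]
    congr 1
    · apply List.flatMap_congr
      intro x hx
      have hxk : x < k := List.mem_range.mp hx
      rw [pv_ch_even0, pv_ch_even1, pv_ch_even2, if_pos (show x + 1 < k + 1 by omega),
        pv_cell0, pv_cell0]
      split_ifs <;> simp_all
    · rw [List.flatMap_cons, List.flatMap_nil, pv_ch_even0, pv_cell0,
        if_neg (show ¬ (k + 1 < k + 1) from by omega)]
      split_ifs <;> rfl

theorem pv_bRow1 (grid : List (List Bool)) (w : Nat) :
    (List.range (3 * w - 2)).map (pvCh grid 1) = pvLinkL (grid.getD 0 []) (grid.getD 1 []) w := by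
  cases w with
  | zero => simp [pvLinkL]
  | succ k =>
    rw [show 3 * (k + 1) - 2 = 3 * k + 1 from by omega, pv_three (pvCh grid 1) k]
    unfold pvLinkL
    rw [List.range_succ, List.flatMap_append]
    congr 1
    · apply List.flatMap_congr
      intro x hx
      have hxk : x < k := List.mem_range.mp hx
      rw [pv_ch_odd0, pv_ch_odd1, pv_ch_odd2, if_pos (show x + 1 < k + 1 by omega)]
      split_ifs <;> simp_all [pvCell]
    · rw [List.flatMap_cons, List.flatMap_nil, pv_ch_odd0,
        if_neg (show ¬ (k + 1 < k + 1) from by omega)]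
      split_ifs <;> simp_all [pvCell]

-- shifting the canvas row by 2 drops the first grid row
theorem pv_ch_shift (a : List Bool) (rest : List (List Bool)) (r c : Nat) :
    pvCh (a :: rest) (r + 2) c = pvCh rest r c := by
  unfold pvCh
  have h1 : (r + 2) / 2 = r / 2 + 1 := by omega
  have h2 : (r + 2) % 2 = r % 2 := by omega
  simp only [h1, h2, pvCell, List.getD_cons_succ]
  rfl

theorem pv_Blines (w : Nat) :
    ∀ (rest : List (List Bool)) (g0 : List Bool),
      (List.range (2 * (rest.length + 1) - 1)).map (fun r =>
          (List.range (3 * w - 2)).map (fun c => pvCh (g0 :: rest) r c)) =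
        pvLines w (g0 :: rest) := by
  intro rest
  induction rest with
  | nil =>
    intro g0
    simp only [List.length_nil]
    rw [show 2 * (0 + 1) - 1 = 1 from rfl]
    simp only [List.range_one, List.map_cons, List.map_nil, pvLines]
    rw [show (fun c => pvCh [g0] 0 c) = pvCh [g0] 0 from rfl, pv_bRow0]
    rfl
  | cons b t ih =>
    intro g0
    rw [show 2 * ((b :: t).length + 1) - 1 = (2 * (t.length + 1) - 1) + 1 + 1 from by
      simp; omega]
    rw [List.range_succ_eq_map, List.range_succ_eq_map]
    simp only [List.map_cons, List.map_map]
    rw [show pvLines w (g0 :: b :: t) =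
        pvNodeL g0 w :: pvLinkL g0 b w :: pvLines w (b :: t) from rfl]
    congr 1
    · have h0 := pv_bRow0 (g0 :: b :: t) w
      simpa using h0
    congr 1
    · have h1 := pv_bRow1 (g0 :: b :: t) w
      simpa using h1
    · rw [← ih b]
      apply List.map_congr_left
      intro r hr
      simp only [Function.comp_apply]
      apply List.map_congr_left
      intro c hc
      exact pv_ch_shift g0 (b :: t) r c

-- ===== VERDICT (by name: the statement is the Claim_ definition above) =====
theorem render_asterism_spec : Claim_equal_render_asterism := by
  intro grid _ _
  unfold Spec_render_asterism
  cases grid with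
  | nil => rfl
  | cons g0 rest =>
    unfold render_asterism render_asterism_alt
    rw [if_neg (by simp), if_neg (by simp)]
    simp only [PySem.List.pyGetD_zero_cons, List.headD_cons]
    set w : Nat := g0.length with hw
    congr 1
    -- A's outer fold to flatMap form
    rw [show (fun (acc : List (List Char)) (y : Int) =>
          let row_str : List Char :=
            (PySem.List.pyRange 0 (w : Int) 1).foldl (fun s x =>
              let s := s ++ (if PySem.List.pyGetD (PySem.List.pyGetD (g0 :: rest) y []) x false
                             then ['★'] else ['·'])
              if x < (w : Int) - 1 then
                s ++ (if PySem.List.pyGetD (PySem.List.pyGetD (g0 :: rest) y []) x false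
                        && PySem.List.pyGetD (PySem.List.pyGetD (g0 :: rest) y []) (x + 1) false
                      then ['─', '─'] else [' ', ' '])
              else s) []
          let acc := acc ++ [row_str]
          if y < ((g0 :: rest).length : Int) - 1 then
            let link_row_str : List Char :=
              (PySem.List.pyRange 0 (w : Int) 1).foldl (fun s x =>
                let s := s ++ (if PySem.List.pyGetD (PySem.List.pyGetD (g0 :: rest) y []) x false
                                 && PySem.List.pyGetD (PySem.List.pyGetD (g0 :: rest) (y + 1) []) x false
                               then ['│'] else [' '])
                if x < (w : Int) - 1 then s ++ [' ', ' '] else s) []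
            acc ++ [link_row_str]
          else acc) = (fun acc y => acc ++
            ([(PySem.List.pyRange 0 (w : Int) 1).foldl (fun s x =>
                let s := s ++ (if PySem.List.pyGetD (PySem.List.pyGetD (g0 :: rest) y []) x false
                               then ['★'] else ['·'])
                if x < (w : Int) - 1 then
                  s ++ (if PySem.List.pyGetD (PySem.List.pyGetD (g0 :: rest) y []) x false
                          && PySem.List.pyGetD (PySem.List.pyGetD (g0 :: rest) y []) (x + 1) false
                        then ['─', '─'] else [' ', ' '])
                else s) []] ++
              if y < ((g0 :: rest).length : Int) - 1 then
                [(PySem.List.pyRange 0 (w : Int) 1).foldl (fun s x =>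
                  let s := s ++ (if PySem.List.pyGetD (PySem.List.pyGetD (g0 :: rest) y []) x false
                                   && PySem.List.pyGetD (PySem.List.pyGetD (g0 :: rest) (y + 1) []) x false
                                 then ['│'] else [' ']) ;
                  if x < (w : Int) - 1 then s ++ [' ', ' '] else s) []]
              else [])) from by
      funext acc y
      by_cases hy : y < ((g0 :: rest).length : Int) - 1
      · simp only [if_pos hy, List.append_assoc]
      · simp only [if_neg hy, List.append_nil]]
    rw [PySem.List.foldl_append_eq_flatMap, List.nil_append,
      PySem.List.pyRange_one 0 ((g0 :: rest).length : Int), List.flatMap_map]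
    rw [show ((g0 :: rest).length : Int) - 0 = ((g0 :: rest).length : Int) from by ring,
      Int.toNat_natCast]
    rw [show (g0 :: rest).length = rest.length + 1 from rfl]
    -- each A line in canonical form, then both sides reduce to pvLines
    rw [pv_Blines w rest g0, ← pv_Alines w rest g0]
    congr 1
    apply List.flatMap_congr
    intro y hy
    have hyn : y < rest.length + 1 := List.mem_range.mp hy
    have hrow : PySem.List.pyGetD (g0 :: rest) ((0 : Int) + (y : Int)) []
        = (g0 :: rest).getD y [] := by simp [PySem.List.pyGetD_natCast]
    congr 1
    · rw [hrow, pv_starRow]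
    · by_cases hc : y + 1 < rest.length + 1
      · rw [if_pos (show (0 : Int) + (y : Int) < ((rest.length + 1 : Nat) : Int) - 1 from by
            omega), if_pos hc]
        have hrow1 : PySem.List.pyGetD (g0 :: rest) ((0 : Int) + (y : Int) + 1) []
            = (g0 :: rest).getD (y + 1) [] := by
          rw [show (0 : Int) + (y : Int) + 1 = ((y + 1 : Nat) : Int) from by push_cast; ring,
            PySem.List.pyGetD_natCast]
        rw [hrow, hrow1, pv_linkRow]
      · rw [if_neg (show ¬ ((0 : Int) + (y : Int) < ((rest.length + 1 : Nat) : Int) - 1) from by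
            omega), if_neg hc]
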